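-- pv_equiv track=rewrite | github.com/aladjii/HSE_homeworks | hw_algo/homework_1/sum/summa.py | max_even_sum
-- ===== SOURCE A (Python) =====
-- from typing import List
--
-- def max_even_sum(arr: List[int]) -> int:
--     total = sum(arr)
--     if total % 2 == 0:
--         return total
--
--     odd_nums = [x for x in arr if x % 2 == 1]
--     if not odd_nums:
--         return 0
--
--     return total - min(odd_nums)
-- ===== SOURCE B (Python) =====
-- from typing import List
--
-- def max_even_sum(arr: List[int]) -> int:
--     evens = [x for x in arr if x % 2 == 0]
--     odds = sorted(x for x in arr if x % 2 != 0)
--     keep = odds if len(odds) % 2 == 0 else odds[1:]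
--     return sum(evens) + sum(keep)
-- ===== Notes on version B (the rewrite author's own statement) =====
-- stated objective: alternative
-- what changed: B partitions the list into evens and odds, SORTS the odds and, when their count is odd, discards the smallest by slicing off the sorted head, returning sum(evens)+sum(kept); it never computes the total, never calls min and never subtracts, unlike A's total-parity-then-subtract-min scheme.
import Mathlib
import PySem

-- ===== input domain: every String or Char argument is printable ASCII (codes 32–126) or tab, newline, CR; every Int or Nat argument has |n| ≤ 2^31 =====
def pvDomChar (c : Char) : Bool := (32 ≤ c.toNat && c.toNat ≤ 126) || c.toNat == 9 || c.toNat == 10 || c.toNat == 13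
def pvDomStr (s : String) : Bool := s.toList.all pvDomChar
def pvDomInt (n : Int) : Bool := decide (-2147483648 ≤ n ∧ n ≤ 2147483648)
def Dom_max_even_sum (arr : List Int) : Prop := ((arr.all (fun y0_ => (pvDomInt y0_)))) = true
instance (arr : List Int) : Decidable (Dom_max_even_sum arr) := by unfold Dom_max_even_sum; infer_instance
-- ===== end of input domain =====

-- B partitions the list into evens and odds, sorts the odds and, when their count is odd,
-- drops the smallest by slicing off the sorted head, returning sum(evens)+sum(kept);
-- A computes the total and subtracts min(odds) when the total is odd. Same values, different algorithm.

-- ===== PORT A =====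
def max_even_sum (arr : List Int) : Int :=
  let total := arr.sum
  if PySem.Int.mod total 2 == 0 then total
  else
    let odd_nums := arr.filter (fun x => PySem.Int.mod x 2 == 1)
    if odd_nums.isEmpty then 0
    else
      -- min(odd_nums) on a nonempty list; 'none' is unreachable here
      match PySem.List.min? odd_nums (fun x => x) with
      | some m => total - m
      | none => 0

-- ===== PORT B =====
def max_even_sum_alt (arr : List Int) : Int :=
  let evens := arr.filter (fun x => PySem.Int.mod x 2 == 0)
  let odds := PySem.List.sorted (arr.filter (fun x => !(PySem.Int.mod x 2 == 0))) (fun x => x) false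
  let keep := if PySem.Int.mod (odds.length : Int) 2 == 0 then odds
              else PySem.List.slice odds (some 1) none
  evens.sum + keep.sum

-- ===== PRECONDITION & SPEC =====
def Spec_max_even_sum (arr : List Int) (out : Int) : Prop := out = max_even_sum_alt arr
instance (arr : List Int) (out : Int) : Decidable (Spec_max_even_sum arr out) := by unfold Spec_max_even_sum; infer_instance

-- ===== CLAIM =====
def Claim_equal_max_even_sum : Prop := ∀ (arr : List Int), Dom_max_even_sum arr → Spec_max_even_sum arr (max_even_sum arr)

-- ===== LEMMAS AND PROOFS =====

lemma mod2_eq (x : Int) : PySem.Int.mod x 2 = x % 2 := PySem.Int.mod_eq_emod_of_pos (by omega)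

lemma odd_bool {x : Int} (h : ¬(PySem.Int.mod x 2 == 0) = true) :
    (!(PySem.Int.mod x 2 == 0)) = true := by
  cases hb : (PySem.Int.mod x 2 == 0) with
  | false => rfl
  | true => exact absurd hb h

lemma even_bool {x : Int} (h : (PySem.Int.mod x 2 == 0) = true) :
    ¬(!(PySem.Int.mod x 2 == 0)) = true := by rw [h]; decide

def evensOf (arr : List Int) : List Int := arr.filter (fun x => PySem.Int.mod x 2 == 0)
def oddsOf  (arr : List Int) : List Int := arr.filter (fun x => !(PySem.Int.mod x 2 == 0))

lemma odds_eq (arr : List Int) :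
    arr.filter (fun x => PySem.Int.mod x 2 == 1) = oddsOf arr := by
  unfold oddsOf
  apply List.filter_congr
  intro x _
  have h2 := mod2_eq x
  have : x % 2 = 0 ∨ x % 2 = 1 := by omega
  rcases this with h | h <;> rw [h2] at * <;> simp [h]

lemma sum_split (arr : List Int) :
    arr.sum = (evensOf arr).sum + (oddsOf arr).sum := by
  induction arr with
  | nil => simp [evensOf, oddsOf]
  | cons x t ih =>
      by_cases h : (PySem.Int.mod x 2 == 0) = true
      · rw [List.sum_cons, show evensOf (x :: t) = x :: evensOf t from List.filter_cons_of_pos h,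
          show oddsOf (x :: t) = oddsOf t from List.filter_cons_of_neg (even_bool h),
          List.sum_cons, ih]; ring
      · rw [List.sum_cons, show evensOf (x :: t) = evensOf t from List.filter_cons_of_neg h,
          show oddsOf (x :: t) = x :: oddsOf t from List.filter_cons_of_pos (odd_bool h),
          List.sum_cons, ih]; ring

lemma parity_eq (arr : List Int) :
    arr.sum % 2 = ((oddsOf arr).length : Int) % 2 := by
  induction arr with
  | nil => simp [oddsOf]
  | cons x t ih =>
      have h2 := mod2_eq x
      by_cases h : (PySem.Int.mod x 2 == 0) = true
      · have hx : x % 2 = 0 := by rw [← h2]; simpa using h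
        rw [List.sum_cons, show oddsOf (x :: t) = oddsOf t from List.filter_cons_of_neg (even_bool h)]
        omega
      · have hx : x % 2 = 1 := by
          have : ¬ PySem.Int.mod x 2 = 0 := by simpa using h
          rw [h2] at this; omega
        rw [List.sum_cons, show oddsOf (x :: t) = x :: oddsOf t from List.filter_cons_of_pos (odd_bool h),
          List.length_cons]
        push_cast
        omega

-- the head of sorted(odds) is the value min(odds) returns
lemma head_sorted_eq_min (O : List Int) (h m : Int) (t : List Int)
    (hs : PySem.List.sorted O (fun x => x) false = h :: t)
    (hm : PySem.List.min? O (fun x => x) = some m) : h = m := by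
  have hperm := PySem.List.sorted_perm O (fun x => x) false
  have hmem_h : h ∈ O := hperm.mem_iff.mp (by rw [hs]; exact List.mem_cons_self)
  have hmem_m : m ∈ O := PySem.List.min?_mem hm
  have h1 : h ≤ m := PySem.List.key_head_sorted_le O (fun x => x) hs m hmem_m
  have h2 : m ≤ h := PySem.List.min?_isMin hm h hmem_h
  omega

-- ===== VERDICT =====
theorem max_even_sum_spec : Claim_equal_max_even_sum := by
  intro arr _
  unfold Spec_max_even_sum max_even_sum max_even_sum_alt
  dsimp only
  rw [odds_eq,
    show arr.filter (fun x => PySem.Int.mod x 2 == 0) = evensOf arr from rfl,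
    show arr.filter (fun x => !(PySem.Int.mod x 2 == 0)) = oddsOf arr from rfl]
  set E := evensOf arr with hE
  set O := oddsOf arr with hO
  set S := PySem.List.sorted O (fun x => x) false with hS
  have hsum : arr.sum = E.sum + O.sum := sum_split arr
  have hpar : arr.sum % 2 = (O.length : Int) % 2 := parity_eq arr
  have hperm : S.Perm O := PySem.List.sorted_perm O (fun x => x) false
  have hsortsum : S.sum = O.sum := hperm.sum_eq
  have hlen : S.length = O.length := hperm.length_eq
  rw [mod2_eq, mod2_eq]
  by_cases he : arr.sum % 2 = 0
  · rw [if_pos (by simpa using he),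
      if_pos (by simpa using (by omega : ((S.length : Int)) % 2 = 0))]
    omega
  · have hne : O ≠ [] := by
      intro h; rw [h] at hpar; simp at hpar; omega
    have hsne : S ≠ [] := by
      rw [hS, Ne, PySem.List.sorted_eq_nil_iff]; exact hne
    obtain ⟨h0, t0, hs⟩ := List.exists_cons_of_ne_nil hsne
    obtain ⟨a, t, hat⟩ := List.exists_cons_of_ne_nil hne
    have hmin : PySem.List.min? O (fun x => x) = some (t.foldl min a) := by
      rw [hat]; exact PySem.List.min?_id_cons a t
    have hhm : h0 = t.foldl min a := head_sorted_eq_min O h0 (t.foldl min a) t0 hs hmin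
    have hoe : O.isEmpty = false := by rw [hat]; rfl
    rw [if_neg (show ¬ ((arr.sum % 2 == 0) = true) by simpa using he)]
    rw [if_neg (show ¬ (O.isEmpty = true) by simp [hoe])]
    rw [hmin]
    rw [if_neg (show ¬ ((((S.length : Int)) % 2 == 0) = true) by
      simpa using (show ¬ ((S.length : Int)) % 2 = 0 by omega))]
    rw [hs, PySem.List.slice_from_one]
    rw [hs] at hsortsum
    simp only [List.sum_cons] at hsortsum
    simp only [List.tail_cons]
    omega
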